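-- pv_equiv track=rewrite | github.com/ohad1s/Intro_to_Python | SemB/TA10/rec.py | best_letter
-- ===== SOURCE A (Python) =====
-- def best_letter(word):
--     if len(word)==1:
--         return word[0]
--     letter= word[0]
--     rec_letter= best_letter(word[1:])
--     if letter<rec_letter:
--         return letter
--     return rec_letter
-- ===== SOURCE B (Python) =====
-- def best_letter(word):
--     best = word[0]
--     for ch in word[1:]:
--         if ch < best:
--             best = ch
--     return best
-- ===== Notes on version B (the rewrite author's own statement) =====
-- stated objective: faster
-- what changed: replaced the O(n^2)-slicing recursion by a single iterative left-to-right scan keeping the current minimum character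
import Mathlib
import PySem

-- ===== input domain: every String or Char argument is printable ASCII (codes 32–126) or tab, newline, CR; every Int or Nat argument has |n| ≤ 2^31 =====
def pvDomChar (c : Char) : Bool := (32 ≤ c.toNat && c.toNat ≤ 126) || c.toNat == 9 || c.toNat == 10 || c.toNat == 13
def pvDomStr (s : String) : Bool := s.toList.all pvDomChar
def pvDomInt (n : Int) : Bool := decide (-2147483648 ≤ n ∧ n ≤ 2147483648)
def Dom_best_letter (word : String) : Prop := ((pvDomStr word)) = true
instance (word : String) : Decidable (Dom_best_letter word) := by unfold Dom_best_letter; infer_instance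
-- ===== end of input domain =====

-- B replaces A's O(n^2) slicing recursion by a single linear scan for the minimum character.

-- ===== PORT A =====
-- A's recursion, on the character list: base case length 1, otherwise compare
-- word[0] (a one-char string) with the recursive minimum of word[1:].
def bestLetterRecA : List Char → String
  | [] => ""          -- Python's word[0] raises IndexError here; excluded by Pre_
  | c :: rest =>
    if (c :: rest).length = 1 then String.ofList [c]
    else
      let letter := String.ofList [c]
      let rec_letter := bestLetterRecA rest
      if letter < rec_letter then letter else rec_letter

def best_letter (word : String) : String := bestLetterRecA word.toList

-- ===== PORT B =====
-- B: best = word[0]; for ch in word[1:]: if ch < best: best = ch; return best.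
def bestLetterScanB : List Char → String
  | [] => ""          -- Python's word[0] raises IndexError here; excluded by Pre_
  | c :: rest =>
    rest.foldl (fun best ch => if String.ofList [ch] < best then String.ofList [ch] else best)
      (String.ofList [c])

def best_letter_alt (word : String) : String := bestLetterScanB word.toList

-- ===== PRECONDITION & SPEC =====
-- Pre_ excludes only the empty string, on which both A and B raise IndexError (word[0]).
def Pre_best_letter (word : String) : Prop := word.toList ≠ []
instance (word : String) : Decidable (Pre_best_letter word) := by unfold Pre_best_letter; infer_instance
def pvWitness_best_letter : String := "ab"
def Spec_best_letter (word : String) (out : String) : Prop := out = best_letter_alt word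
instance (word : String) (out : String) : Decidable (Spec_best_letter word out) := by unfold Spec_best_letter; infer_instance

-- ===== CLAIM (what is proved, stated in full; the proofs are below) =====
def Claim_equal_best_letter : Prop := ∀ (word : String), Dom_best_letter word → Pre_best_letter word → Spec_best_letter word (best_letter word)

-- ===== LEMMAS AND PROOFS =====

lemma if_lt_eq_min (a b : String) : (if a < b then a else b) = min a b := by
  rcases lt_or_ge a b with h | h
  · simp [h, min_eq_left h.le]
  · simp [not_lt.2 h, min_eq_right h]

-- B's loop body, rewritten through `min`
lemma scan_as_min (l : List Char) (b : String) :
    l.foldl (fun best ch => if String.ofList [ch] < best then String.ofList [ch] else best) b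
      = l.foldl (fun best ch => min (String.ofList [ch]) best) b := by
  induction l generalizing b with
  | nil => rfl
  | cons x xs ih => rw [List.foldl, List.foldl, if_lt_eq_min, ih]

lemma min_foldl (l : List Char) (a b : String) :
    min a (l.foldl (fun best ch => min (String.ofList [ch]) best) b)
      = l.foldl (fun best ch => min (String.ofList [ch]) best) (min b a) := by
  induction l generalizing a b with
  | nil => exact min_comm a b
  | cons x xs ih =>
      simp only [List.foldl]
      rw [ih, min_assoc, min_comm b a]

lemma rec_eq_scan (c : Char) (rest : List Char) :
    bestLetterRecA (c :: rest) = bestLetterScanB (c :: rest) := by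
  induction rest generalizing c with
  | nil => rfl
  | cons d rest ih =>
      have hlen : (c :: d :: rest).length ≠ 1 := by simp
      rw [bestLetterRecA, if_neg hlen]
      simp only [ih d]
      rw [bestLetterScanB, bestLetterScanB, scan_as_min, scan_as_min, List.foldl,
        if_lt_eq_min, min_foldl]

-- ===== VERDICT (by name: the statement is the Claim_ definition above) =====
theorem best_letter_spec : Claim_equal_best_letter := by
  intro word _ hpre
  unfold Spec_best_letter best_letter best_letter_alt
  cases h : word.toList with
  | nil => exact absurd h hpre
  | cons c rest => exact rec_eq_scan c rest
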